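-- pv_equiv track=rewrite | github.com/pthom/litgen | src/srcmlcpp/cpp_types/scope/cpp_scope_identifiers.py | _make_terse_scoped_identifier
-- ===== SOURCE A (Python) =====
-- def _make_terse_scoped_identifier(scoped_identifier: str, current_scope: str) -> str:
--     identifier_parts = scoped_identifier.split("::")
--     scope_parts = current_scope.split("::")
--
--     # if current_scope = 'NA::N0::N1::N3'
--     # and scoped_identifier =    'N1::N2::S2::s1'
--     # We need to remove NA::N0 from current scope
--     identifier_first_part = identifier_parts[0]
--     if identifier_first_part in scope_parts:
--         idx = scope_parts.index(identifier_first_part)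
--         scope_parts = scope_parts[idx:]
--
--     # To account for this test:
--     # assert _make_terse_scoped_identifier(scoped_identifier = "N1::N3::S3", current_scope = "N0::N1::N3") == "S3"
--     # take current_scope, and construct
--     #    N0::N1::N3
--     #    N1::N3
--     #    N3
--     for i in range(len(scope_parts)):
--         scope_extract = "::".join(scope_parts[: len(scope_parts) - i]) + "::"  # will be "N0::N1::N3", "N1::N3", "N3"
--         if scoped_identifier.startswith(scope_extract):
--             r = scoped_identifier[len(scope_extract) :]
--             return r
--
--     for i in range(len(scope_parts)):
--         scope_extract = "::".join(scope_parts[i:]) + "::"  # will be "N0::N1::N3", "N1::N3", "N3"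
--         if scoped_identifier.startswith(scope_extract):
--             r = scoped_identifier[len(scope_extract) :]
--             return r
--     return scoped_identifier
-- ===== SOURCE B (Python) =====
-- def _make_terse_scoped_identifier(scoped_identifier: str, current_scope: str) -> str:
--     scope_parts = current_scope.split("::")
--     first = scoped_identifier.split("::")[0]
--     if first in scope_parts:
--         scope_parts = scope_parts[scope_parts.index(first):]
--
--     # Work with character positions instead of candidate strings.
--     # full = every scope token followed by "::"; cuts = positions of token boundaries in full.
--     full = "::".join(scope_parts) + "::"
--     cuts = [0]
--     for t in scope_parts:
--         cuts.append(cuts[-1] + len(t) + 2)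
--     # cuts == [0, q1, ..., qn] with qn == len(full); full[:q] / full[q:] are the
--     # prefix / suffix joins A tests.
--
--     # Longest common prefix of scoped_identifier and full, computed once.
--     m = 0
--     while m < len(scoped_identifier) and m < len(full) and scoped_identifier[m] == full[m]:
--         m += 1
--     # A's first pass = longest boundary q with full[:q] a prefix, i.e. largest q <= m.
--     for q in reversed(cuts[1:]):
--         if q <= m:
--             return scoped_identifier[q:]
--     # A's second pass: suffixes full[q:] of full, longest (smallest q) first.
--     for q in cuts[:-1]:
--         if scoped_identifier.startswith(full[q:]):
--             return scoped_identifier[len(full) - q:]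
--     return scoped_identifier
-- ===== Notes on version B (the rewrite author's own statement) =====
-- stated objective: alternative
-- what changed: B replaces A's candidate-string generation and repeated startswith tests by position arithmetic on one precomputed string: it concatenates the adjusted scope once into full, records the token-boundary cut positions, computes a single character-level longest-common-prefix of the identifier with full, answers A's whole first loop by picking the largest cut position not exceeding that LCP, and answers the second loop by slicing full at each cut position instead of re-joining token slices.
import Mathlib
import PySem

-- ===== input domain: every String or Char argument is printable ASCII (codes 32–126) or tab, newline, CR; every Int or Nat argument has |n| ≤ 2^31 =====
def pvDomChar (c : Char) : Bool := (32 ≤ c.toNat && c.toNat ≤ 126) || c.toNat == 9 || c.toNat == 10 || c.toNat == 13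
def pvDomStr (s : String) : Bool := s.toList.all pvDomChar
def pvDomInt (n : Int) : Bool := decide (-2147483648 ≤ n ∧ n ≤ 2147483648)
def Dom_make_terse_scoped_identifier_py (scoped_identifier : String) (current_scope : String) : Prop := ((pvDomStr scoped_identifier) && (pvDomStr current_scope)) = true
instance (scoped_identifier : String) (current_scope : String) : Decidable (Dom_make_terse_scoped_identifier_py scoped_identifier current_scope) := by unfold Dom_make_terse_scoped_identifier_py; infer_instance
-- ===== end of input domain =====

-- B trades A's join-of-slice candidate strings for position arithmetic on one precomputed scope string (boundary cuts + a single longest-common-prefix scan for the first pass); alternative decomposition, similar cost.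


-- ===== PORT A =====
-- first loop: 'for i in range(len(scope_parts)): scope_extract = "::".join(scope_parts[: len(scope_parts) - i]) + "::" …'
def a_scan1 (si : String) (parts : List String) : List Int → Option String
  | [] => none
  | i :: rest =>
      let scope_extract := PySem.Str.join "::" (PySem.List.slice parts none (some ((parts.length : Int) - i))) ++ "::"
      if PySem.Str.startswith si scope_extract then
        some (PySem.Str.slice si (some (PySem.Str.len scope_extract)) none)
      else a_scan1 si parts rest

-- second loop: 'for i in range(len(scope_parts)): scope_extract = "::".join(scope_parts[i:]) + "::" …'
def a_scan2 (si : String) (parts : List String) : List Int → Option String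
  | [] => none
  | i :: rest =>
      let scope_extract := PySem.Str.join "::" (PySem.List.slice parts (some i) none) ++ "::"
      if PySem.Str.startswith si scope_extract then
        some (PySem.Str.slice si (some (PySem.Str.len scope_extract)) none)
      else a_scan2 si parts rest

def make_terse_scoped_identifier_py (scoped_identifier : String) (current_scope : String) : String :=
  let identifier_parts := (PySem.Str.split? scoped_identifier "::").getD []   -- sep "::" ≠ "": split? is always some
  let scope_parts := (PySem.Str.split? current_scope "::").getD []
  let identifier_first_part := (PySem.List.pyGet? identifier_parts 0).getD "" -- split never returns []: [0] never raises
  let scope_parts :=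
    if scope_parts.contains identifier_first_part then
      match PySem.List.index? scope_parts identifier_first_part with
      | some idx => PySem.List.slice scope_parts (some (idx : Int)) none
      | none => scope_parts
    else scope_parts
  match a_scan1 scoped_identifier scope_parts (PySem.List.pyRange 0 (scope_parts.length : Int) 1) with
  | some r => r
  | none =>
    match a_scan2 scoped_identifier scope_parts (PySem.List.pyRange 0 (scope_parts.length : Int) 1) with
    | some r => r
    | none => scoped_identifier

-- ===== PORT B =====
-- 'cuts.append(cuts[-1] + len(t) + 2)' (the pair's second component carries cuts[-1])
def b_cutsFold (st : List Int × Int) (t : String) : List Int × Int :=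
  let q := st.2 + PySem.Str.len t + 2
  (st.1 ++ [q], q)

-- 'm = 0; while m < len(si) and m < len(full) and si[m] == full[m]: m += 1'
def b_lcp : List Char → List Char → Nat
  | a :: s, b :: l => if a == b then b_lcp s l + 1 else 0
  | _, _ => 0

-- 'for q in reversed(cuts[1:]): if q <= m: return scoped_identifier[q:]'
def b_prefScan (si : String) (m : Int) : List Int → Option String
  | [] => none
  | q :: rest =>
      if q ≤ m then some (PySem.Str.slice si (some q) none) else b_prefScan si m rest

-- 'for q in cuts[:-1]: if scoped_identifier.startswith(full[q:]): return scoped_identifier[len(full) - q:]'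
def b_sufScan (si : String) (full : String) (L : Int) : List Int → Option String
  | [] => none
  | q :: rest =>
      if PySem.Str.startswith si (PySem.Str.slice full (some q) none) then
        some (PySem.Str.slice si (some (L - q)) none)
      else b_sufScan si full L rest

def make_terse_scoped_identifier_py_alt (scoped_identifier : String) (current_scope : String) : String :=
  let scope_parts := (PySem.Str.split? current_scope "::").getD []            -- sep "::" ≠ "": split? is always some
  let first := (PySem.List.pyGet? ((PySem.Str.split? scoped_identifier "::").getD []) 0).getD ""
  let scope_parts :=
    if scope_parts.contains first then
      match PySem.List.index? scope_parts first with
      | some idx => PySem.List.slice scope_parts (some (idx : Int)) none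
      | none => scope_parts
    else scope_parts
  let full := PySem.Str.join "::" scope_parts ++ "::"
  let cuts := (scope_parts.foldl b_cutsFold ([0], 0)).1
  let m := b_lcp scoped_identifier.toList full.toList
  match b_prefScan scoped_identifier (m : Int) ((PySem.List.slice cuts (some 1) none).reverse) with
  | some r => r
  | none =>
    match b_sufScan scoped_identifier full (PySem.Str.len full) (PySem.List.slice cuts none (some (-1))) with
    | some r => r
    | none => scoped_identifier

-- ===== PRECONDITION & SPEC =====
def Spec_make_terse_scoped_identifier_py (scoped_identifier : String) (current_scope : String) (out : String) : Prop := out = make_terse_scoped_identifier_py_alt scoped_identifier current_scope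
instance (scoped_identifier : String) (current_scope : String) (out : String) : Decidable (Spec_make_terse_scoped_identifier_py scoped_identifier current_scope out) := by unfold Spec_make_terse_scoped_identifier_py; infer_instance

-- ===== CLAIM (what is proved, stated in full; the proofs are below) =====
def Claim_equal_make_terse_scoped_identifier_py : Prop := ∀ (scoped_identifier : String) (current_scope : String), Dom_make_terse_scoped_identifier_py scoped_identifier current_scope → Spec_make_terse_scoped_identifier_py scoped_identifier current_scope (make_terse_scoped_identifier_py scoped_identifier current_scope)

-- ===== LEMMAS AND PROOFS =====

-- canonical candidate string: every token of l followed by "::"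
def catsep : List String → String
  | [] => ""
  | t :: r => t ++ "::" ++ catsep r

-- canonical first-match scan both sides are reduced to
def firstCand (si : String) : List String → Option String
  | [] => none
  | c :: rest =>
      if PySem.Str.startswith si c then
        some (PySem.Str.slice si (some (PySem.Str.len c)) none)
      else firstCand si rest

theorem catsep_toList (l : List String) :
    (catsep l).toList = (l.map (fun s => s.toList ++ [':', ':'])).flatten := by
  induction l with
  | nil => rfl
  | cons t r ih => simp [catsep, String.toList_append, ih]

theorem chars_join_catsep (L : List (List Char)) (h : L ≠ []) :
    PySem.Chars.join [':', ':'] L ++ [':', ':'] = (L.map (· ++ [':', ':'])).flatten := by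
  induction L with
  | nil => simp at h
  | cons p rest ih =>
    cases rest with
    | nil => simp [PySem.Chars.join_singleton]
    | cons q rest' =>
      rw [PySem.Chars.join_cons_cons]
      simp only [List.map_cons, List.flatten_cons]
      rw [List.append_assoc, List.append_assoc, ih (by simp)]
      simp

theorem join_catsep (l : List String) (h : l ≠ []) :
    PySem.Str.join "::" l ++ "::" = catsep l := by
  apply String.toList_inj.mp
  rw [String.toList_append, PySem.Str.toList_join, catsep_toList]
  have : ("::" : String).toList = [':', ':'] := rfl
  rw [this, chars_join_catsep _ (by simpa using h), List.map_map]
  rfl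

theorem catsep_append (l1 l2 : List String) : catsep (l1 ++ l2) = catsep l1 ++ catsep l2 := by
  induction l1 with
  | nil => simp [catsep]
  | cons t r ih => simp [catsep, ih, String.append_assoc]

-- A's scans are firstCand over the canonical candidate lists
def clen (l : List String) : Int := ((catsep l).toList.length : Int)

theorem clen_cons (t : String) (r : List String) :
    clen (t :: r) = PySem.Str.len t + 2 + clen r := by
  simp [clen, catsep, String.toList_append]
  omega

theorem strlen_eq (s : String) : PySem.Str.len s = (s.toList.length : Int) := by simp

theorem strlen_catsep (l : List String) : PySem.Str.len (catsep l) = clen l := by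
  simp [clen]

theorem clen_split (l : List String) (j : Nat) :
    clen l = clen (l.take j) + clen (l.drop j) := by
  have h : catsep l = catsep (l.take j) ++ catsep (l.drop j) := by
    rw [← catsep_append, List.take_append_drop]
  simp only [clen, h, String.toList_append, List.length_append]
  push_cast
  ring

theorem scan1_map (si : String) (P : List String) (is : List Int) :
    a_scan1 si P is
      = firstCand si (is.map (fun i =>
          PySem.Str.join "::" (PySem.List.slice P none (some ((P.length : Int) - i))) ++ "::")) := by
  induction is with
  | nil => rfl
  | cons i rest ih => simp only [a_scan1, List.map_cons, firstCand, ih]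

theorem scan2_map (si : String) (P : List String) (is : List Int) :
    a_scan2 si P is
      = firstCand si (is.map (fun i =>
          PySem.Str.join "::" (PySem.List.slice P (some i) none) ++ "::")) := by
  induction is with
  | nil => rfl
  | cons i rest ih => simp only [a_scan2, List.map_cons, firstCand, ih]

theorem scan1_eq (si : String) (P : List String) :
    a_scan1 si P (PySem.List.pyRange 0 (P.length : Int) 1)
      = firstCand si ((List.range P.length).map (fun i => catsep (P.take (P.length - i)))) := by
  rw [scan1_map, PySem.List.pyRange_zero_natCast, List.map_map]
  congr 1
  apply List.map_congr_left
  intro i hi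
  have hi' : i < P.length := List.mem_range.mp hi
  show PySem.Str.join "::" (PySem.List.slice P none (some ((P.length : Int) - (i : Int)))) ++ "::"
      = catsep (P.take (P.length - i))
  have hnn : ((P.length : Int) - (i : Int)) = ((P.length - i : Nat) : Int) := by omega
  rw [hnn, PySem.List.slice_to_natCast, join_catsep]
  intro hnil
  have hlen := congrArg List.length hnil
  simp [List.length_take] at hlen
  omega

theorem scan2_eq (si : String) (P : List String) :
    a_scan2 si P (PySem.List.pyRange 0 (P.length : Int) 1)
      = firstCand si ((List.range P.length).map (fun i => catsep (P.drop i))) := by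
  rw [scan2_map, PySem.List.pyRange_zero_natCast, List.map_map]
  congr 1
  apply List.map_congr_left
  intro i hi
  have hi' : i < P.length := List.mem_range.mp hi
  show PySem.Str.join "::" (PySem.List.slice P (some ((i : Nat) : Int)) none) ++ "::"
      = catsep (P.drop i)
  rw [PySem.List.slice_from_natCast, join_catsep]
  intro hnil
  have hlen := congrArg List.length hnil
  simp at hlen
  omega

-- B's cut positions in closed form
def cutsAux (c : Int) : List String → List Int
  | [] => []
  | t :: r => (c + PySem.Str.len t + 2) :: cutsAux (c + PySem.Str.len t + 2) r

theorem foldl_cuts (P : List String) : ∀ (l : List Int) (c : Int),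
    (P.foldl b_cutsFold (l, c)).1 = l ++ cutsAux c P := by
  induction P with
  | nil => intro l c; simp [cutsAux]
  | cons t r ih => intro l c; simp [b_cutsFold, cutsAux, ih]

theorem cutsAux_eq (P : List String) : ∀ c : Int,
    cutsAux c P = (List.range P.length).map (fun k => c + clen (P.take (k + 1))) := by
  induction P with
  | nil => intro c; simp [cutsAux]
  | cons t r ih =>
    intro c
    simp only [cutsAux, List.length_cons, List.range_succ_eq_map, List.map_cons, List.map_map]
    congr 1
    · have : clen ((t :: r).take (0 + 1)) = PySem.Str.len t + 2 := by
        simp [List.take_succ_cons, clen, catsep]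
      rw [this]
      omega
    · rw [ih (c + PySem.Str.len t + 2)]
      apply List.map_congr_left
      intro k _
      show (c + PySem.Str.len t + 2) + clen (r.take (k + 1)) = c + clen ((t :: r).take (k + 1 + 1))
      rw [List.take_succ_cons, clen_cons]
      omega

-- the two generic scan-alignment lemmas
theorem prefScan_eq (si : String) (m : Int) (cs : List String)
    (h : ∀ c ∈ cs, (PySem.Str.len c ≤ m ↔ PySem.Str.startswith si c = true)) :
    b_prefScan si m (cs.map PySem.Str.len) = firstCand si cs := by
  induction cs with
  | nil => rfl
  | cons c rest ih =>
    simp only [List.map_cons, b_prefScan, firstCand]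
    by_cases hs : PySem.Str.startswith si c = true
    · rw [if_pos ((h c (by simp)).mpr hs), if_pos hs]
    · rw [if_neg (fun hq => hs ((h c (by simp)).mp hq)), if_neg hs,
        ih (fun c hc => h c (by simp [hc]))]

theorem sufScan_eq (si full : String) (L : Int) (cs : List String)
    (h : ∀ c ∈ cs, PySem.Str.slice full (some (L - PySem.Str.len c)) none = c) :
    b_sufScan si full L (cs.map (fun c => L - PySem.Str.len c)) = firstCand si cs := by
  induction cs with
  | nil => rfl
  | cons c rest ih =>
    simp only [List.map_cons, b_sufScan, firstCand]
    rw [h c (by simp)]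
    have harith : L - (L - PySem.Str.len c) = PySem.Str.len c := by ring
    rw [harith, ih (fun c hc => h c (by simp [hc]))]

-- the LCP characterisation: for a prefix c of l, c prefixes s iff |c| ≤ lcp(s, l)
theorem lcp_iff (s l c : List Char) (hcl : c <+: l) :
    (c <+: s ↔ c.length ≤ b_lcp s l) := by
  induction c generalizing s l with
  | nil => simp
  | cons a c' ih =>
    obtain ⟨l', rfl⟩ := hcl
    cases s with
    | nil => simp [b_lcp]
    | cons b s' =>
      show (a :: c') <+: (b :: s') ↔ c'.length + 1 ≤ b_lcp (b :: s') (a :: (c' ++ l'))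
      by_cases hab : b = a
      · subst hab
        rw [List.cons_prefix_cons]
        have hbl : b_lcp (b :: s') (b :: (c' ++ l')) = b_lcp s' (c' ++ l') + 1 := by
          simp [b_lcp]
        rw [hbl, ih s' (c' ++ l') (List.prefix_append c' l')]
        constructor
        · rintro ⟨-, h⟩; omega
        · intro h; exact ⟨rfl, by omega⟩
      · have hba : (b == a) = false := beq_false_of_ne hab
        have hbl : b_lcp (b :: s') (a :: (c' ++ l')) = 0 := by
          simp [b_lcp, hba]
        rw [List.cons_prefix_cons, hbl]
        constructor
        · rintro ⟨h1, -⟩; exact absurd h1.symm hab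
        · intro h; exact absurd h (by omega)

-- list equality for the prefix pass
theorem pref_cuts_eq (P : List String) :
    (cutsAux 0 P).reverse
      = ((List.range P.length).map (fun i => catsep (P.take (P.length - i)))).map PySem.Str.len := by
  rw [cutsAux_eq, List.map_map]
  apply List.ext_getElem (by simp)
  intro j hj1 hj2
  simp only [List.length_reverse, List.length_map, List.length_range] at hj1
  rw [List.getElem_reverse]
  simp only [List.getElem_map, List.getElem_range, Function.comp, strlen_catsep,
    List.length_map, List.length_range]
  have : P.length - 1 - j + 1 = P.length - j := by omega
  rw [this]
  omega

-- list equality for the suffix pass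
theorem suf_cuts_eq (P : List String) (h : P ≠ []) :
    (0 :: cutsAux 0 P).dropLast
      = ((List.range P.length).map (fun i => catsep (P.drop i))).map
          (fun c => PySem.Str.len (catsep P) - PySem.Str.len c) := by
  have hn : 0 < P.length := List.length_pos_iff.mpr h
  apply List.ext_getElem
  · rw [List.length_dropLast]
    simp [cutsAux_eq]
  intro j hj1 hj2
  rw [List.getElem_dropLast]
  simp only [List.length_map, List.length_range] at hj2
  simp only [List.map_map, List.getElem_map, List.getElem_range, Function.comp,
    strlen_catsep]
  have hsplit := clen_split P j
  cases j with
  | zero =>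
    show (0 : Int) = clen P - clen (P.drop 0)
    simp only [List.drop_zero] at *
    have h0 : clen (P.take 0) = 0 := by simp [clen, catsep]
    omega
  | succ k =>
    rw [List.getElem_cons_succ]
    simp only [cutsAux_eq, List.getElem_map, List.getElem_range]
    have hsplit' := clen_split P (k + 1)
    omega

theorem main_eq (si : String) (P : List String) :
    (match a_scan1 si P (PySem.List.pyRange 0 (P.length : Int) 1) with
     | some r => r
     | none =>
       match a_scan2 si P (PySem.List.pyRange 0 (P.length : Int) 1) with
       | some r => r
       | none => si)
    = (match b_prefScan si ((b_lcp si.toList (PySem.Str.join "::" P ++ "::").toList : Nat) : Int)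
          ((PySem.List.slice (P.foldl b_cutsFold ([0], 0)).1 (some 1) none).reverse) with
       | some r => r
       | none =>
         match b_sufScan si (PySem.Str.join "::" P ++ "::")
             (PySem.Str.len (PySem.Str.join "::" P ++ "::"))
             (PySem.List.slice (P.foldl b_cutsFold ([0], 0)).1 none (some (-1))) with
         | some r => r
         | none => si) := by
  cases hcase : P with
  | nil => rfl
  | cons p ps =>
    rw [← hcase]
    have hP : P ≠ [] := by rw [hcase]; simp
    have hfull : PySem.Str.join "::" P ++ "::" = catsep P := join_catsep P hP
    rw [hfull, foldl_cuts, List.singleton_append, PySem.List.slice_from_one,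
      PySem.List.slice_to_neg_one, List.tail_cons, scan1_eq, scan2_eq,
      pref_cuts_eq, suf_cuts_eq P hP]
    have hpre : ∀ c ∈ (List.range P.length).map (fun i => catsep (P.take (P.length - i))),
        (PySem.Str.len c ≤ ((b_lcp si.toList (catsep P).toList : Nat) : Int) ↔
          PySem.Str.startswith si c = true) := by
      intro c hc
      obtain ⟨i, hi, rfl⟩ := List.mem_map.mp hc
      have hsplitcat : catsep P
          = catsep (P.take (P.length - i)) ++ catsep (P.drop (P.length - i)) := by
        rw [← catsep_append, List.take_append_drop]
      have hpref : (catsep (P.take (P.length - i))).toList <+: (catsep P).toList := by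
        rw [hsplitcat, String.toList_append]
        exact List.prefix_append _ _
      have hiff := lcp_iff si.toList (catsep P).toList _ hpref
      have hsw : PySem.Str.startswith si (catsep (P.take (P.length - i))) = true ↔
          (catsep (P.take (P.length - i))).toList <+: si.toList := by
        simp [PySem.Chars.startswith_iff]
      rw [hsw, strlen_eq, Nat.cast_le]
      exact hiff.symm
    have hsuf : ∀ c ∈ (List.range P.length).map (fun i => catsep (P.drop i)),
        PySem.Str.slice (catsep P)
          (some (PySem.Str.len (catsep P) - PySem.Str.len c)) none = c := by
      intro c hc
      obtain ⟨i, hi, rfl⟩ := List.mem_map.mp hc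
      have hsplitcat : catsep P = catsep (P.take i) ++ catsep (P.drop i) := by
        rw [← catsep_append, List.take_append_drop]
      have hlen : PySem.Str.len (catsep P) - PySem.Str.len (catsep (P.drop i))
          = (((catsep (P.take i)).toList.length : Nat) : Int) := by
        rw [strlen_catsep, strlen_catsep]
        have := clen_split P i
        simp only [clen] at this ⊢
        omega
      rw [hlen]
      apply String.toList_inj.mp
      have hts : (PySem.Str.slice (catsep P)
          (some (((catsep (P.take i)).toList.length : Nat) : Int)) none).toList
          = PySem.List.slice (catsep P).toList
              (some (((catsep (P.take i)).toList.length : Nat) : Int)) none := by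
        simp
      rw [hts, PySem.List.slice_from_natCast, hsplitcat, String.toList_append,
        List.drop_left]
    rw [prefScan_eq si _ _ hpre, sufScan_eq si _ _ _ hsuf]

-- ===== VERDICT (by name: the statement is the Claim_ definition above) =====
theorem make_terse_scoped_identifier_py_spec : Claim_equal_make_terse_scoped_identifier_py := by
  intro si cs _
  unfold Spec_make_terse_scoped_identifier_py
  simp only [make_terse_scoped_identifier_py, make_terse_scoped_identifier_py_alt]
  exact main_eq si _
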